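-- pv_equiv track=rewrite | github.com/luboise/IIDX-MusicDB-Tools | dbTools.py | LEReadData
-- ===== SOURCE A (Python) =====
-- def LEReadData(array, start_index, data_type):
-- 	if data_type == "int":
-- 		length = 4
-- 	elif data_type == "short":
-- 		length = 2
-- 	elif data_type == "long":
-- 		length = 8
-- 	else:
-- 		raise ValueError("Incorrect data type given: " + data_type)
--
-- 	if (start_index < 0) or (start_index + (length) > len(array)):
-- 		raise ValueError("Invalid start index or data_type given:\nArray length: " + str(len(array)) + "\nStarting index: " + str(start_index) + "\nEnd index: " + str(start_index + length - 1))
--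
-- 	return_num = 0
--
-- 	for i in range(length):
-- 		byte = array[start_index + i]
-- 		byte_HI = byte // 16
-- 		byte_LO = byte % 16
--
-- 		return_num += byte_HI * (16 ** (2*i + 1)) + byte_LO  * (16 ** (2*i))
--
-- 	return return_num
-- ===== SOURCE B (Python) =====
-- def LEReadData(array, start_index, data_type):
-- 	lengths = {"int": 4, "short": 2, "long": 8}
-- 	if data_type not in lengths:
-- 		raise ValueError("Incorrect data type given: " + data_type)
-- 	length = lengths[data_type]
--
-- 	if (start_index < 0) or (start_index + (length) > len(array)):
-- 		raise ValueError("Invalid start index or data_type given:\nArray length: " + str(len(array)) + "\nStarting index: " + str(start_index) + "\nEnd index: " + str(start_index + length - 1))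
--
-- 	return_num = 0
-- 	for i in reversed(range(length)):
-- 		return_num = return_num * 256 + array[start_index + i]
-- 	return return_num
-- ===== Notes on version B (the rewrite author's own statement) =====
-- stated objective: alternative
-- what changed: Replaces the forward loop that splits each byte into nibbles and sums independent positional power terms with a Horner-scheme backward scan keeping a single running register (acc*256 + byte), plus a dict for the type-to-length mapping.
import Mathlib
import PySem

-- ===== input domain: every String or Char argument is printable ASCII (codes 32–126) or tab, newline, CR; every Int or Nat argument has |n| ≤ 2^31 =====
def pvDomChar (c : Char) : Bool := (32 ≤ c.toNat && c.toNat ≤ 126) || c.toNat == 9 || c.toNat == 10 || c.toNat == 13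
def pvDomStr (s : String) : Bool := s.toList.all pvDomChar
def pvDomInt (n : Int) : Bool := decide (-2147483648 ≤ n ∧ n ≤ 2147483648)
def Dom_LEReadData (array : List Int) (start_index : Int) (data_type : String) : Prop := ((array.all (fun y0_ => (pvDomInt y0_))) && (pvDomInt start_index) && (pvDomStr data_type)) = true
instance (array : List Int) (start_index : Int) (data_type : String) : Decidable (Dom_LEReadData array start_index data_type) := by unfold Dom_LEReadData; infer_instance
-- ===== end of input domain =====

-- B reads the little-endian value with a Horner-scheme backward scan (acc*256 + byte) instead of A's forward nibble-splitting positional sum; same results, similar cost.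
-- ===== PORT A =====
def LEReadData (array : List Int) (start_index : Int) (data_type : String) : Int :=
  let length : Int :=
    if data_type = "int" then 4
    else if data_type = "short" then 2
    else if data_type = "long" then 8
    else 0  -- Python raises ValueError here; excluded by Pre_
  if length = 0 then 0
  else if start_index < 0 ∨ start_index + length > (array.length : Int) then 0  -- ValueError; excluded by Pre_
  else (PySem.List.pyRange 0 length 1).foldl (fun return_num i =>
      let byte := PySem.List.pyGetD array (start_index + i) 0
      let byte_HI := PySem.Int.floordiv byte 16
      let byte_LO := PySem.Int.mod byte 16
      return_num + byte_HI * 16 ^ (2 * i + 1).toNat + byte_LO * 16 ^ (2 * i).toNat) 0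

-- ===== PORT B =====
def LEReadData_alt (array : List Int) (start_index : Int) (data_type : String) : Int :=
  let lengths : PySem.Dict String Int := PySem.Dict.ofList [("int", 4), ("short", 2), ("long", 8)]
  match lengths.get? data_type with
  | none => 0  -- Python raises ValueError here; excluded by Pre_
  | some length =>
    if start_index < 0 ∨ start_index + length > (array.length : Int) then 0  -- ValueError; excluded by Pre_
    else ((PySem.List.pyRange 0 length 1).reverse).foldl (fun return_num i =>
        return_num * 256 + PySem.List.pyGetD array (start_index + i) 0) 0

-- ===== PRECONDITION & SPEC =====
-- Pre_ excludes exactly the inputs where A raises ValueError: an unknown data_type, or bounds outside the array.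
def Pre_LEReadData (array : List Int) (start_index : Int) (data_type : String) : Prop :=
  0 ≤ start_index ∧
  ((data_type = "int" ∧ start_index + 4 ≤ (array.length : Int)) ∨
   (data_type = "short" ∧ start_index + 2 ≤ (array.length : Int)) ∨
   (data_type = "long" ∧ start_index + 8 ≤ (array.length : Int)))
instance (array : List Int) (start_index : Int) (data_type : String) : Decidable (Pre_LEReadData array start_index data_type) := by unfold Pre_LEReadData; infer_instance
def pvWitness_LEReadData : List Int × Int × String := ([1, 2, 3, 4, 5], 1, "int")
def Spec_LEReadData (array : List Int) (start_index : Int) (data_type : String) (out : Int) : Prop := out = LEReadData_alt array start_index data_type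
instance (array : List Int) (start_index : Int) (data_type : String) (out : Int) : Decidable (Spec_LEReadData array start_index data_type out) := by unfold Spec_LEReadData; infer_instance

-- ===== CLAIM (what is proved, stated in full; the proofs are below) =====
def Claim_equal_LEReadData : Prop := ∀ (array : List Int) (start_index : Int) (data_type : String), Dom_LEReadData array start_index data_type → Pre_LEReadData array start_index data_type → Spec_LEReadData array start_index data_type (LEReadData array start_index data_type)

-- ===== LEMMAS AND PROOFS =====
-- key arithmetic fact: splitting a byte into nibbles and recombining positionally recovers the byte
theorem nibble_recombine (b : Int) : PySem.Int.floordiv b 16 * 16 + PySem.Int.mod b 16 = b :=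
  PySem.Int.floordiv_mul_add_mod b 16

-- ===== VERDICT (by name: the statement is the Claim_ definition above) =====
theorem LEReadData_spec : Claim_equal_LEReadData := by
  intro array si dt hdom hpre
  unfold Spec_LEReadData
  obtain ⟨h0, h⟩ := hpre
  rcases h with ⟨hdt, hb⟩ | ⟨hdt, hb⟩ | ⟨hdt, hb⟩ <;> subst hdt <;>
    unfold LEReadData LEReadData_alt <;>
    simp only [String.reduceEq, if_true, if_false]
  · rw [(by decide : (PySem.Dict.ofList [("int", (4:Int)), ("short", 2), ("long", 8)]).get? "int" = some 4)]
    dsimp only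
    rw [if_neg (show ¬ (si < 0 ∨ si + 4 > (array.length : Int)) by omega),
        if_neg (show ¬ (si < 0 ∨ si + 4 > (array.length : Int)) by omega)]
    rw [(by decide : PySem.List.pyRange 0 4 1 = [0, 1, 2, 3])]
    rw [(by decide : ([0, 1, 2, 3] : List Int).reverse = [3, 2, 1, 0])]
    simp only [List.foldl]
    norm_num [Int.toNat]
    have e0 := nibble_recombine (PySem.List.pyGetD array (si + 0) 0)
    have e1 := nibble_recombine (PySem.List.pyGetD array (si + 1) 0)
    have e2 := nibble_recombine (PySem.List.pyGetD array (si + 2) 0)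
    have e3 := nibble_recombine (PySem.List.pyGetD array (si + 3) 0)
    omega
  · rw [(by decide : (PySem.Dict.ofList [("int", (4:Int)), ("short", 2), ("long", 8)]).get? "short" = some 2)]
    dsimp only
    rw [if_neg (show ¬ (si < 0 ∨ si + 2 > (array.length : Int)) by omega),
        if_neg (show ¬ (si < 0 ∨ si + 2 > (array.length : Int)) by omega)]
    rw [(by decide : PySem.List.pyRange 0 2 1 = [0, 1])]
    rw [(by decide : ([0, 1] : List Int).reverse = [1, 0])]
    simp only [List.foldl]
    norm_num [Int.toNat]
    have e0 := nibble_recombine (PySem.List.pyGetD array (si + 0) 0)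
    have e1 := nibble_recombine (PySem.List.pyGetD array (si + 1) 0)
    omega
  · rw [(by decide : (PySem.Dict.ofList [("int", (4:Int)), ("short", 2), ("long", 8)]).get? "long" = some 8)]
    dsimp only
    rw [if_neg (show ¬ (si < 0 ∨ si + 8 > (array.length : Int)) by omega),
        if_neg (show ¬ (si < 0 ∨ si + 8 > (array.length : Int)) by omega)]
    rw [(by decide : PySem.List.pyRange 0 8 1 = [0, 1, 2, 3, 4, 5, 6, 7])]
    rw [(by decide : ([0, 1, 2, 3, 4, 5, 6, 7] : List Int).reverse = [7, 6, 5, 4, 3, 2, 1, 0])]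
    simp only [List.foldl]
    norm_num [Int.toNat]
    have e0 := nibble_recombine (PySem.List.pyGetD array (si + 0) 0)
    have e1 := nibble_recombine (PySem.List.pyGetD array (si + 1) 0)
    have e2 := nibble_recombine (PySem.List.pyGetD array (si + 2) 0)
    have e3 := nibble_recombine (PySem.List.pyGetD array (si + 3) 0)
    have e4 := nibble_recombine (PySem.List.pyGetD array (si + 4) 0)
    have e5 := nibble_recombine (PySem.List.pyGetD array (si + 5) 0)
    have e6 := nibble_recombine (PySem.List.pyGetD array (si + 6) 0)
    have e7 := nibble_recombine (PySem.List.pyGetD array (si + 7) 0)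
    omega
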